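-- pv_equiv track=rewrite | github.com/mtholder/taxalotl | taxalotl/col_ingest/key_generator.py | replace_entry_with_key
-- ===== SOURCE A (Python) =====
-- def replace_entry_with_key(record_iter, val_index, initial_mapping=None):
--     if not initial_mapping:
--         val_to_key = {}
--         next_key = 0
--     else:
--         val_to_key = initial_mapping
--         next_key = 1 + max(initial_mapping.values())
--     for n, record in enumerate(record_iter):
--         value = record[val_index]
--         key = val_to_key.setdefault(value, next_key)
--         if key == next_key:
--             next_key += 1
--         record[val_index] = key
--     return val_to_key
-- ===== SOURCE B (Python) =====
-- def replace_entry_with_key(record_iter, val_index, initial_mapping=None):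
--     records = list(record_iter)
--     vals = [record[val_index] for record in records]
--     if initial_mapping:
--         val_to_key = initial_mapping
--         nk = 1 + max(initial_mapping.values())
--     else:
--         val_to_key = {}
--         nk = 0
--     # stage 1: collect the fresh values in first-appearance order
--     fresh = []
--     for v in vals:
--         if v not in val_to_key and v not in fresh:
--             fresh.append(v)
--     # stage 2: hand out consecutive keys to the fresh values
--     for v in fresh:
--         val_to_key[v] = nk
--         nk += 1
--     # stage 3: rewrite the records through the finished table
--     for record in records:
--         record[val_index] = val_to_key[record[val_index]]
--     return val_to_key
-- ===== Notes on version B (the rewrite author's own statement) =====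
-- stated objective: alternative
-- what changed: A does one interleaved pass that assigns keys via setdefault with an explicit next_key counter while rewriting each record; B materializes the records and splits the work into three staged passes: extract the value column, collect the fresh values in first-appearance order into a list, hand them consecutive keys, then rewrite all records through the finished table.
import Mathlib
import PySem

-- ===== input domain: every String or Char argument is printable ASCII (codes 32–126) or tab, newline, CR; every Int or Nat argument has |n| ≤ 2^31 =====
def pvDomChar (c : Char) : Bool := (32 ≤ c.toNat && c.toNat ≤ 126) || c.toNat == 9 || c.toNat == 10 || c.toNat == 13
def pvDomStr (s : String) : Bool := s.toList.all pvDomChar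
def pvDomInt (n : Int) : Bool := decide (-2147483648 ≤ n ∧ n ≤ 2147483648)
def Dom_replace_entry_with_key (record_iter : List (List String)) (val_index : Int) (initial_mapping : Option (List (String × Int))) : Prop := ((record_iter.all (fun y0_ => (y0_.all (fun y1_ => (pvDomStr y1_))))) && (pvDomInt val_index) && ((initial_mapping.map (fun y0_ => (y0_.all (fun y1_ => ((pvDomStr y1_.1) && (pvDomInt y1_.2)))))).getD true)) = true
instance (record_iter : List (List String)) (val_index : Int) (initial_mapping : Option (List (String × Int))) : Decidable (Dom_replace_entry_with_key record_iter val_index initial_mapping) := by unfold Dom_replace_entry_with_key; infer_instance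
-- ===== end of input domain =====

-- B replaces A's single interleaved setdefault-plus-counter pass by three staged passes:
-- extract the value column, collect the fresh values in first-appearance order, hand them
-- consecutive keys, then rewrite the records through the finished table. Both Pythons mutate
-- the records (and a given initial_mapping) in place identically; the equivalence proved here
-- is about the RETURN value (the value-to-key dict) only.

-- ===== PORT A =====
def replace_entry_with_key (record_iter : List (List String)) (val_index : Int) (initial_mapping : Option (List (String × Int))) : List (String × Int) :=
  -- "if not initial_mapping: … else: val_to_key = initial_mapping; next_key = 1 + max(values)"
  let init : PySem.Dict String Int × Int :=
    match initial_mapping with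
    | none => (PySem.Dict.empty, 0)
    | some m =>
      if m.isEmpty then (PySem.Dict.empty, 0)
      else
        let d := PySem.Dict.ofList m
        (d, 1 + ((PySem.List.max? d.values (fun v => v)).getD 0))
  -- "for n, record in enumerate(record_iter): …"  (n is unused by the body)
  let final := record_iter.foldl
    (fun (st : PySem.Dict String Int × Int) record =>
      let value := PySem.List.pyGetD record val_index ""   -- record[val_index]; Pre_ keeps the index in range
      let key := (st.1.get? value).getD st.2               -- key = val_to_key.setdefault(value, next_key) (value read)
      let d := st.1.setdefault value st.2                  -- (dict effect of setdefault)
      let nk := if key = st.2 then st.2 + 1 else st.2      -- "if key == next_key: next_key += 1"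
      (d, nk))
    init
  final.1.items

-- ===== PORT B =====
def replace_entry_with_key_alt (record_iter : List (List String)) (val_index : Int) (initial_mapping : Option (List (String × Int))) : List (String × Int) :=
  -- records = list(record_iter); vals = [record[val_index] for record in records]
  let vals := record_iter.map (fun record => PySem.List.pyGetD record val_index "")
  -- "if initial_mapping: val_to_key = initial_mapping; nk = 1 + max(...) else: val_to_key = {}; nk = 0"
  let start : PySem.Dict String Int × Int :=
    match initial_mapping with
    | some m =>
      if !m.isEmpty then
        let d := PySem.Dict.ofList m
        (d, 1 + ((PySem.List.max? d.values (fun v => v)).getD 0))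
      else (PySem.Dict.empty, 0)
    | none => (PySem.Dict.empty, 0)
  -- stage 1: fresh values, first-appearance order ("v not in val_to_key and v not in fresh")
  let fresh := vals.foldl
    (fun (acc : List String) v =>
      if start.1.contains v || acc.contains v then acc else acc ++ [v]) []
  -- stage 2: consecutive keys for the fresh values ("val_to_key[v] = nk; nk += 1")
  let final := fresh.foldl
    (fun (st : PySem.Dict String Int × Int) v => (st.1.insert v st.2, st.2 + 1)) start
  -- (stage 3 only rewrites the records in place; it does not touch the returned dict)
  final.1.items

-- ===== PRECONDITION & SPEC =====
-- Pre_ excludes exactly the IndexError inputs: records where record[val_index] is out of range.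
def Pre_replace_entry_with_key (record_iter : List (List String)) (val_index : Int) (initial_mapping : Option (List (String × Int))) : Prop :=
  ∀ r ∈ record_iter, PySem.Raise.InRange r.length val_index
instance (record_iter : List (List String)) (val_index : Int) (initial_mapping : Option (List (String × Int))) : Decidable (Pre_replace_entry_with_key record_iter val_index initial_mapping) := by unfold Pre_replace_entry_with_key; infer_instance
def pvWitness_replace_entry_with_key : List (List String) × Int × (Option (List (String × Int))) :=
  ([["a"], ["b"], ["a"]], 0, some [("x", 3)])

def Spec_replace_entry_with_key (record_iter : List (List String)) (val_index : Int) (initial_mapping : Option (List (String × Int))) (out : List (String × Int)) : Prop := out = replace_entry_with_key_alt record_iter val_index initial_mapping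
instance (record_iter : List (List String)) (val_index : Int) (initial_mapping : Option (List (String × Int))) (out : List (String × Int)) : Decidable (Spec_replace_entry_with_key record_iter val_index initial_mapping out) := by unfold Spec_replace_entry_with_key; infer_instance

-- ===== CLAIM (what is proved, stated in full; the proofs are below) =====
def Claim_equal_replace_entry_with_key : Prop := ∀ (record_iter : List (List String)) (val_index : Int) (initial_mapping : Option (List (String × Int))), Dom_replace_entry_with_key record_iter val_index initial_mapping → Pre_replace_entry_with_key record_iter val_index initial_mapping → Spec_replace_entry_with_key record_iter val_index initial_mapping (replace_entry_with_key record_iter val_index initial_mapping)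

-- ===== LEMMAS AND PROOFS =====

-- recursive presentation of B's fresh-collection pass: the values of vs not hit by predicate p,
-- deduplicated in first-appearance order
def freshRec : List String → (String → Bool) → List String
  | [], _ => []
  | v :: vs, p => if p v then freshRec vs p else v :: freshRec vs (fun w => p w || w == v)

lemma freshRec_congr : ∀ (vs : List String) (p q : String → Bool), (∀ v, p v = q v) →
    freshRec vs p = freshRec vs q := by
  intro vs
  induction vs with
  | nil => intro p q _; rfl
  | cons v vs ih =>
    intro p q h
    simp only [freshRec, h v]
    cases hq : q v with
    | true => simp [ih p q h]
    | false =>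
      simp only [if_false, Bool.false_eq_true]
      rw [ih (fun w => p w || w == v) (fun w => q w || w == v) (fun w => by simp [h w])]

-- B's foldl over an accumulator equals the recursive form
lemma freshFold_eq (d : PySem.Dict String Int) : ∀ (vs : List String) (acc : List String),
    vs.foldl (fun (acc : List String) v =>
        if d.contains v || acc.contains v then acc else acc ++ [v]) acc
    = acc ++ freshRec vs (fun v => d.contains v || acc.contains v) := by
  intro vs
  induction vs with
  | nil => intro acc; simp [freshRec]
  | cons v vs ih =>
    intro acc
    simp only [List.foldl_cons, freshRec]
    by_cases hp : (d.contains v || acc.contains v) = true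
    · rw [hp, if_pos rfl, if_pos rfl, ih]
    · rw [eq_false_of_ne_true hp, if_neg (by simp), if_neg (by simp), ih (acc ++ [v]),
        List.append_assoc]
      congr 1
      rw [List.singleton_append]
      congr 1
      apply freshRec_congr
      intro w
      by_cases hwv : w = v
      · simp [hwv]
      · have hb : (w == v) = false := beq_eq_false_iff_ne.mpr hwv
        simp [hwv, hb]

-- core invariant: A's interleaved (dict, counter) fold equals B's assignment fold over the
-- fresh values, whenever every value stored in the dict is below the counter
lemma A_fold_eq_assign : ∀ (vs : List String) (d : PySem.Dict String Int) (nk : Int),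
    (∀ w ∈ d.values, w < nk) →
    (vs.foldl (fun (st : PySem.Dict String Int × Int) v =>
        (st.1.setdefault v st.2,
          if (st.1.get? v).getD st.2 = st.2 then st.2 + 1 else st.2)) (d, nk)).1
    = ((freshRec vs (fun v => d.contains v)).foldl
        (fun (st : PySem.Dict String Int × Int) v => (st.1.insert v st.2, st.2 + 1)) (d, nk)).1 := by
  intro vs
  induction vs with
  | nil => intro d nk _; rfl
  | cons v vs ih =>
    intro d nk hvals
    simp only [List.foldl_cons, freshRec]
    by_cases hc : d.contains v = true
    · -- already present: A's state is unchanged, v is not fresh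
      obtain ⟨w, hw⟩ : ∃ w, d.get? v = some w := by
        have := PySem.Dict.contains_eq_isSome_get? d v
        rw [hc] at this
        exact Option.isSome_iff_exists.mp this.symm
      have hlt : w < nk := by
        apply hvals
        have := PySem.Dict.mem_items_of_get?_eq_some _ hw
        simp only [PySem.Dict.values]
        exact List.mem_map.mpr ⟨(v, w), this, rfl⟩
      rw [hw, Option.getD_some, PySem.Dict.setdefault_of_contains _ _ hc,
        if_neg (by omega : ¬ w = nk), hc, if_pos rfl]
      exact ih d nk hvals
    · -- fresh: A inserts (v, nk) and increments; v heads B's fresh list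
      have hc' : d.contains v = false := by simpa using hc
      have hget : d.get? v = none := by
        have := PySem.Dict.contains_eq_isSome_get? d v
        rw [hc'] at this
        simpa using this.symm
      rw [hget, Option.getD_none, PySem.Dict.setdefault_of_not_contains _ _ hc',
        if_pos rfl, hc', if_neg (by simp), List.foldl_cons]
      have hinv : ∀ w ∈ (d.insert v nk).values, w < nk + 1 := by
        intro w hwmem
        rcases PySem.Dict.mem_values_insert _ _ _ _ hwmem with h | h
        · omega
        · have := hvals w h; omega
      rw [ih (d.insert v nk) (nk + 1) hinv,
        freshRec_congr vs (fun w => (d.insert v nk).contains w) (fun w => d.contains w || w == v)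
          (fun w => by simp only [PySem.Dict.contains_insert]; exact Bool.or_comm _ _)]

-- everything assembled at an arbitrary starting state
lemma main_of (vi : Int) (l : List (List String)) (d : PySem.Dict String Int) (nk : Int)
    (hvals : ∀ w ∈ d.values, w < nk) :
    (l.foldl
      (fun (st : PySem.Dict String Int × Int) record =>
        (st.1.setdefault (PySem.List.pyGetD record vi "") st.2,
          if (st.1.get? (PySem.List.pyGetD record vi "")).getD st.2 = st.2 then st.2 + 1 else st.2))
      (d, nk)).1.items
    = (((l.map (fun record => PySem.List.pyGetD record vi "")).foldl
          (fun (acc : List String) v =>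
            if d.contains v || acc.contains v then acc else acc ++ [v]) []).foldl
        (fun (st : PySem.Dict String Int × Int) v => (st.1.insert v st.2, st.2 + 1)) (d, nk)).1.items := by
  have hA : l.foldl
      (fun (st : PySem.Dict String Int × Int) record =>
        (st.1.setdefault (PySem.List.pyGetD record vi "") st.2,
          if (st.1.get? (PySem.List.pyGetD record vi "")).getD st.2 = st.2 then st.2 + 1 else st.2))
      (d, nk)
    = (l.map (fun record => PySem.List.pyGetD record vi "")).foldl
        (fun (st : PySem.Dict String Int × Int) v =>
          (st.1.setdefault v st.2,
            if (st.1.get? v).getD st.2 = st.2 then st.2 + 1 else st.2)) (d, nk) := by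
    rw [List.foldl_map]
  rw [hA]
  generalize l.map (fun record => PySem.List.pyGetD record vi "") = vs
  rw [freshFold_eq d vs [], List.nil_append]
  have hfr : freshRec vs (fun v => d.contains v || ([] : List String).contains v)
      = freshRec vs (fun v => d.contains v) :=
    freshRec_congr _ _ _ (fun w => by simp)
  rw [hfr, A_fold_eq_assign vs d nk hvals]

-- ===== VERDICT (by name: the statement is the Claim_ definition above) =====
theorem replace_entry_with_key_spec : Claim_equal_replace_entry_with_key := by
  unfold Claim_equal_replace_entry_with_key
  intro record_iter val_index initial_mapping _ _
  unfold Spec_replace_entry_with_key replace_entry_with_key replace_entry_with_key_alt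
  rcases initial_mapping with _ | m
  · exact main_of _ _ _ _ (by simp [PySem.Dict.values, PySem.Dict.empty])
  · by_cases hm : m.isEmpty
    · simp only [hm, Bool.not_true, reduceIte]
      exact main_of _ _ _ _ (by simp [PySem.Dict.values, PySem.Dict.empty])
    · simp only [Bool.not_eq_true] at hm
      simp only [hm, Bool.not_false, reduceIte]
      apply main_of
      intro w hw
      rcases hmax : PySem.List.max? (PySem.Dict.ofList m).values (fun v => v) with _ | M
      · rw [PySem.List.max?_eq_none_iff] at hmax
        rw [hmax] at hw; simp at hw
      · have := PySem.List.max?_isMax hmax w hw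
        simp only [Option.getD_some]
        omega
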